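-- pv_equiv track=rewrite | github.com/amirhm10/RLLyapunovPolymer | analysis/direct_lyapunov_latest_run_numerics_report.py | group_steps
-- ===== SOURCE A (Python) =====
-- from typing import Dict, Iterable, List, Sequence
--
-- def group_steps(steps: Sequence[int], max_gap: int = 2) -> List[tuple[int, int]]:
--     if not steps:
--         return []
--     ordered = sorted(steps)
--     groups: List[tuple[int, int]] = []
--     start = ordered[0]
--     prev = ordered[0]
--     for step in ordered[1:]:
--         if step - prev <= max_gap:
--             prev = step
--             continue
--         groups.append((start, prev))
--         start = step
--         prev = step
--     groups.append((start, prev))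
--     return groups
-- ===== SOURCE B (Python) =====
-- def group_steps(steps, max_gap=2):
--     ordered = sorted(steps)
--     if not ordered:
--         return []
--     n = len(ordered)
--     breaks = [i for i, (a, b) in enumerate(zip(ordered, ordered[1:]), 1) if b - a > max_gap]
--     bounds = [0] + breaks + [n]
--     return [(ordered[lo], ordered[hi - 1]) for lo, hi in zip(bounds, bounds[1:])]
-- ===== Notes on version B (the rewrite author's own statement) =====
-- stated objective: alternative
-- what changed: B is staged: it first computes the list of break indices (positions where the sorted gap exceeds max_gap), then materialises the ranges by indexing the sorted list at consecutive boundaries (0, breaks, n), instead of A's single on-the-fly pass maintaining start/prev accumulators.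
import Mathlib
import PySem

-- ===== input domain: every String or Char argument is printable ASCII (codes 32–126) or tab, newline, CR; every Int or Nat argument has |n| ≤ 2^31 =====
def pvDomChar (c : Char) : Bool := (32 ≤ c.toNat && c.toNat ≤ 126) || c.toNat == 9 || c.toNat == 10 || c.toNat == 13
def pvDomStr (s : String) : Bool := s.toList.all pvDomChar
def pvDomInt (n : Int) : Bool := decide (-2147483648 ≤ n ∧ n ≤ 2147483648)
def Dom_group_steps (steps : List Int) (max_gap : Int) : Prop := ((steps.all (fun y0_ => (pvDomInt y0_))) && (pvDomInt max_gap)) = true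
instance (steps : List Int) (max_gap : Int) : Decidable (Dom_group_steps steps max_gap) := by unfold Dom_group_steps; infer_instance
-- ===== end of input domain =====

-- B stages the work: first compute break indices (where the sorted gap exceeds max_gap), then emit ranges by indexing the sorted list at consecutive boundaries — instead of A's single pass with start/prev accumulators; objective: alternative decomposition, same cost.

-- ===== PORT A =====
def group_steps (steps : List Int) (max_gap : Int) : List (Int × Int) :=
  if steps = [] then []
  else
    let ordered := PySem.List.sorted steps (fun x => x) false
    let start := ordered.headD 0          -- ordered[0]; ordered is nonempty here, exact
    let st := (PySem.List.slice ordered (some 1) none).foldl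
      (fun (s : List (Int × Int) × Int × Int) step =>
        if step - s.2.2 ≤ max_gap then (s.1, s.2.1, step)
        else (s.1 ++ [(s.2.1, s.2.2)], step, step))
      ([], start, start)
    st.1 ++ [(st.2.1, st.2.2)]

-- ===== PORT B =====
def group_steps_alt (steps : List Int) (max_gap : Int) : List (Int × Int) :=
  let ordered := PySem.List.sorted steps (fun x => x) false
  if ordered = [] then []
  else
    let n : Int := ordered.length
    let breaks := ((PySem.List.enumerate (ordered.zip (PySem.List.slice ordered (some 1) none)) 1).filter
      (fun p => p.2.2 - p.2.1 > max_gap)).map (·.1)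
    let bounds := 0 :: (breaks ++ [n])            -- [0] + breaks + [n]
    (bounds.zip (PySem.List.slice bounds (some 1) none)).map
      (fun p => (PySem.List.pyGetD ordered p.1 0, PySem.List.pyGetD ordered (p.2 - 1) 0))
      -- ordered[lo], ordered[hi-1]: all indices are nonnegative and in range here, so pyGetD is exact

-- ===== PRECONDITION & SPEC =====
def Spec_group_steps (steps : List Int) (max_gap : Int) (out : List (Int × Int)) : Prop := out = group_steps_alt steps max_gap
instance (steps : List Int) (max_gap : Int) (out : List (Int × Int)) : Decidable (Spec_group_steps steps max_gap out) := by unfold Spec_group_steps; infer_instance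

-- ===== CLAIM (what is proved, stated in full; the proofs are below) =====
def Claim_equal_group_steps : Prop := ∀ (steps : List Int) (max_gap : Int), Dom_group_steps steps max_gap → Spec_group_steps steps max_gap (group_steps steps max_gap)

-- ===== LEMMAS AND PROOFS =====

-- reference recursion: the grouped ranges of start/prev followed by the list l
def pvRef (g start prev : Int) : List Int → List (Int × Int)
  | [] => [(start, prev)]
  | x :: xs => if x - prev ≤ g then pvRef g start x xs else (start, prev) :: pvRef g x x xs

-- consecutive pairs starting from p
def pvPairs (p : Int) : List Int → List (Int × Int)
  | [] => []
  | x :: xs => (p, x) :: pvPairs x xs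

-- break indices of the tail t, previous element p, current index i
def pvBrk (g : Int) (i p : Int) : List Int → List Int
  | [] => []
  | x :: xs => if x - p > g then i :: pvBrk g (i+1) x xs else pvBrk g (i+1) x xs

lemma pvZip_eq_pairs (t : List Int) : ∀ h : Int, (h :: t).zip t = pvPairs h t := by
  induction t with
  | nil => intro h; rfl
  | cons x xs ih => intro h; rw [List.zip_cons_cons, ih x]; rfl

lemma pvA_loop (g : Int) (l : List Int) : ∀ (acc : List (Int × Int)) (start prev : Int),
    (let st := l.foldl
      (fun (s : List (Int × Int) × Int × Int) step =>
        if step - s.2.2 ≤ g then (s.1, s.2.1, step)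
        else (s.1 ++ [(s.2.1, s.2.2)], step, step)) (acc, start, prev)
     st.1 ++ [(st.2.1, st.2.2)]) = acc ++ pvRef g start prev l := by
  induction l with
  | nil => intro acc start prev; simp [pvRef]
  | cons x xs ih =>
    intro acc start prev
    simp only [List.foldl_cons, pvRef]
    by_cases h : x - prev ≤ g
    · simp only [h, if_true]
      exact ih acc start x
    · simp only [h, if_false]
      rw [ih (acc ++ [(start, prev)]) x x]
      simp

lemma pvBrk_enum (g : Int) (t : List Int) : ∀ (p i : Int),
    ((PySem.List.enumerate (pvPairs p t) i).filter (fun q => q.2.2 - q.2.1 > g)).map (·.1)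
      = pvBrk g i p t := by
  induction t with
  | nil => intro p i; rfl
  | cons x xs ih =>
    intro p i
    simp only [pvPairs, PySem.List.enumerate_cons, List.filter_cons, pvBrk]
    by_cases h : x - p > g
    · simp only [h, decide_true, if_true, List.map_cons, ih x (i+1)]
    · simp only [h, decide_false, Bool.false_eq_true, if_false, ih x (i+1)]

lemma pvEmit (g : Int) (l : List Int) (t : List Int) : ∀ (k : Nat) (lo start p : Int),
    1 ≤ k → l.drop k = t →
    PySem.List.pyGetD l lo 0 = start →
    l.getD (k-1) 0 = p →
    (pvPairs lo (pvBrk g (k : Int) p t ++ [(k : Int) + (t.length : Int)])).map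
      (fun q => (PySem.List.pyGetD l q.1 0, PySem.List.pyGetD l (q.2 - 1) 0))
      = pvRef g start p t := by
  induction t with
  | nil =>
    intro k lo start p hk hdrop hlo hp
    have h1 : ((k : Int) + 0 - 1) = ((k - 1 : Nat) : Int) := by omega
    simp only [pvBrk, List.nil_append, pvPairs, List.map_cons, List.map_nil, pvRef,
      List.length_nil, Int.natCast_zero, hlo, h1, PySem.List.pyGetD_natCast, hp]
  | cons x xs ih =>
    intro k lo start p hk hdrop hlo hp
    have hget : l[k]? = some x := by
      have h0 : (l.drop k)[0]? = l[k]? := by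
        rw [List.getElem?_drop]; norm_num
      rw [← h0, hdrop]; rfl
    have hx : l.getD k 0 = x := by
      rw [List.getD_eq_getElem?_getD, hget]; rfl
    have hdrop' : l.drop (k+1) = xs := by
      rw [← List.tail_drop, hdrop]; rfl
    have hxInt : PySem.List.pyGetD l (k : Int) 0 = x := by
      simp only [PySem.List.pyGetD_natCast]; exact hx
    have h1 : ((k : Int) - 1) = ((k - 1 : Nat) : Int) := by omega
    simp only [pvBrk, pvRef, List.length_cons]
    by_cases h : x - p > g
    · have hnle : ¬ (x - p ≤ g) := by omega
      simp only [h, if_true, hnle, if_false, List.cons_append, pvPairs, List.map_cons]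
      have hrec := ih (k+1) (k : Int) x x (by omega) hdrop' hxInt (by simpa using hx)
      push_cast at hrec ⊢
      rw [show (k : Int) + ((xs.length : Int) + 1) = (k : Int) + 1 + (xs.length : Int) by ring, hrec]
      rw [hlo, h1, PySem.List.pyGetD_natCast, hp]
    · have hle : x - p ≤ g := by omega
      simp only [h, if_false, hle, if_true]
      have hrec := ih (k+1) lo start x (by omega) hdrop' hlo (by simpa using hx)
      push_cast at hrec ⊢
      rw [show (k : Int) + ((xs.length : Int) + 1) = (k : Int) + 1 + (xs.length : Int) by ring, hrec]

lemma pvSorted_ne_nil (steps : List Int) (h : steps ≠ []) :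
    PySem.List.sorted steps (fun x => x) false ≠ [] := by
  intro hs
  have := PySem.List.length_sorted (xs := steps) (key := fun x => x) (rev := false)
  rw [hs] at this
  exact h (List.eq_nil_of_length_eq_zero this.symm)

-- ===== VERDICT (by name: the statement is the Claim_ definition above) =====
theorem group_steps_spec : Claim_equal_group_steps := by
  intro steps max_gap _
  unfold Spec_group_steps group_steps group_steps_alt
  by_cases hs : steps = []
  · subst hs; rfl
  · have hne := pvSorted_ne_nil steps hs
    simp only [if_neg hs, if_neg hne]
    obtain ⟨h, t, ho⟩ : ∃ h t, PySem.List.sorted steps (fun x => x) false = h :: t := by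
      cases hx : PySem.List.sorted steps (fun x => x) false with
      | nil => exact absurd hx hne
      | cons a b => exact ⟨a, b, rfl⟩
    rw [ho]
    have hslice : PySem.List.slice (h :: t) (some 1) none = t := by
      simpa using PySem.List.slice_from (h :: t) (a := 1) (by norm_num)
    rw [hslice]
    -- A side
    have hA := pvA_loop max_gap t [] h h
    simp only [List.nil_append] at hA
    simp only [List.headD_cons]
    rw [hA]
    -- B side
    rw [pvZip_eq_pairs t h, pvBrk_enum max_gap t h 1]
    have hbounds : PySem.List.slice ((0 : Int) :: (pvBrk max_gap 1 h t ++ [((h :: t).length : Int)])) (some 1) none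
        = pvBrk max_gap 1 h t ++ [((h :: t).length : Int)] := by
      simpa using PySem.List.slice_from ((0 : Int) :: (pvBrk max_gap 1 h t ++ [((h :: t).length : Int)])) (a := 1) (by norm_num)
    rw [hbounds, pvZip_eq_pairs _ 0]
    have hn : ((h :: t).length : Int) = 1 + (t.length : Int) := by
      simp only [List.length_cons]; push_cast; ring
    have hE := pvEmit max_gap (h :: t) t 1 0 h h (by omega) (by simp)
      (by simp [PySem.List.pyGetD_zero_cons]) (by simp)
    simp only [Nat.cast_one] at hE
    rw [hn]
    exact hE.symm
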